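-- pv_equiv track=rewrite | github.com/981377660LMT/algorithm-study | 19_数学/6222. 美丽整数的最小增量.py | makeIntegerBeautiful
-- ===== SOURCE A (Python) =====
-- def makeIntegerBeautiful(n: int, target: int) -> int:
--     def carry(num: int) -> int:
--         """最低的非0位进位(carry)
--
--         16 -> 20
--         19 -> 20
--         20 -> 100
--         101 -> 110
--         110 -> 200
--         """
--         base = 10
--         while True:
--             div, mod = divmod(num, base)
--             if mod == 0:
--                 base *= 10
--             else:
--                 return (div + 1) * base
--
--     cur = n
--     while True:
--         if sum(map(int, str(cur))) <= target:
--             return cur - n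
--         cur = carry(cur)
-- ===== SOURCE B (Python) =====
-- def makeIntegerBeautiful(n: int, target: int) -> int:
--     def solve(num: int) -> int:
--         """Smallest 'candidate' >= num (reached by zeroing a suffix) with digit sum <= target."""
--         if sum(map(int, str(num))) <= target:
--             return num
--         return solve(num // 10 + 1) * 10
--
--     return solve(n) - n
-- ===== Notes on version B (the rewrite author's own statement) =====
-- stated objective: simpler
-- what changed: Replaces A's iterative search that walks through successive full-width candidates via an inner divmod 'carry' loop (find the lowest nonzero digit, round up there) by a short recursion that strips the last digit (num // 10 + 1), tests the digit sum of that prefix, and rescales by 10 on return; B examines small prefix values A never forms and has no inner loop.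
import Mathlib
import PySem

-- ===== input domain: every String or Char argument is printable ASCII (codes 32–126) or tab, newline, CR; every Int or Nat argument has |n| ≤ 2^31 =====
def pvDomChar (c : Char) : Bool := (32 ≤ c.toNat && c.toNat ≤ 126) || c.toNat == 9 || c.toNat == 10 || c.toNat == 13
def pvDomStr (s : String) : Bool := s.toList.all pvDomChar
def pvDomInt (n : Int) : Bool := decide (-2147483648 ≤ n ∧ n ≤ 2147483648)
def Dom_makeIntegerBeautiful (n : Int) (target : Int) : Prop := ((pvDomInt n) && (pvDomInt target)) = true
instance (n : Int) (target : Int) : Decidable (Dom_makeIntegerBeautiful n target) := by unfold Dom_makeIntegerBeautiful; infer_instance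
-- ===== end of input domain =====

-- B replaces A's two nested while loops (outer candidate scan + inner divmod `carry` helper)
-- by a short recursion that strips the last digit (num // 10 + 1), tests the digit sum of the
-- prefix, and rescales by 10 on return (objective: simpler; same asymptotic cost).

-- ===== PORT A =====

-- sum(map(int, str(m))): int(c) on a single character ported by hand as c.toNat - 48,
-- exact for digit characters — every character of str(m) for m ≥ 0, which Pre_ guarantees.
def digitSum (m : Int) : Int :=
  ((PySem.Int.toStr m).toList.map (fun c => (c.toNat : Int) - 48)).sum

-- the inner `while True` of carry, fueled (fuel is always sufficient under Pre_)
def carryGo (num : Int) (base : Int) : Nat → Int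
  | 0 => 0
  | f + 1 =>
    match PySem.Int.divmod? num base with
    | none => 0
    | some (div, mod) => if mod = 0 then carryGo num (base * 10) f else (div + 1) * base

def carryA (num : Int) : Int := carryGo num 10 (num.toNat + 1)

-- the outer `while True`, fueled (fuel is always sufficient under Pre_)
def loopA (n target cur : Int) : Nat → Int
  | 0 => 0
  | f + 1 => if digitSum cur ≤ target then cur - n else loopA n target (carryA cur) f

def makeIntegerBeautiful (n : Int) (target : Int) : Int :=
  loopA n target n (n.toNat + 2)

-- ===== PORT B =====

-- the recursive `solve` of Source B, fueled (fuel is always sufficient under Pre_)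
def solveB (target num : Int) : Nat → Int
  | 0 => 0
  | f + 1 =>
    if digitSum num ≤ target then num
    else solveB target (PySem.Int.floordiv num 10 + 1) f * 10

def makeIntegerBeautiful_alt (n : Int) (target : Int) : Int :=
  solveB target n (n.toNat + 2) - n

-- ===== PRECONDITION & SPEC =====
-- A raises ValueError for n < 0 (int('-')) and never returns when target ≤ 0 and n ≥ 1
-- (or target < 0 and n = 0); Pre_ admits exactly the inputs where A returns.
def Pre_makeIntegerBeautiful (n : Int) (target : Int) : Prop :=
  0 ≤ n ∧ (1 ≤ target ∨ (n = 0 ∧ 0 ≤ target))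
instance (n : Int) (target : Int) : Decidable (Pre_makeIntegerBeautiful n target) := by unfold Pre_makeIntegerBeautiful; infer_instance

def pvWitness_makeIntegerBeautiful : Int × Int := (16, 6)

def Spec_makeIntegerBeautiful (n : Int) (target : Int) (out : Int) : Prop := out = makeIntegerBeautiful_alt n target
instance (n : Int) (target : Int) (out : Int) : Decidable (Spec_makeIntegerBeautiful n target out) := by unfold Spec_makeIntegerBeautiful; infer_instance

-- ===== CLAIM (what is proved, stated in full; the proofs are below) =====
def Claim_equal_makeIntegerBeautiful : Prop := ∀ (n : Int) (target : Int), Dom_makeIntegerBeautiful n target → Pre_makeIntegerBeautiful n target → Spec_makeIntegerBeautiful n target (makeIntegerBeautiful n target)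

-- ===== LEMMAS AND PROOFS =====

-- A's loop is shown to search the "ceil chain" candB n k = ceil(n/10^k)*10^k (helper ceilGo),
-- which is then rewritten as a recursion on the prefix (helper ceilF) and finally shown equal
-- to B's recursion solveB, whose argument differs from ceilF's only when 10 divides the prefix.

-- the ceil-chain candidate of level k
def candB (n : Int) (k : Nat) : Int := ((n - 1) / 10 ^ k + 1) * 10 ^ k

-- k-indexed search over the ceil chain, returning cand - n
def ceilGo (n target : Int) (k : Nat) : Nat → Int
  | 0 => 0
  | f + 1 => if digitSum (candB n k) ≤ target then candB n k - n else ceilGo n target (k + 1) f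

-- the same search as a recursion on the prefix u_k = (n-1)/10^k + 1
def ceilF (target m : Int) : Nat → Int
  | 0 => 0
  | f + 1 => if digitSum m ≤ target then m else 10 * ceilF target ((m - 1) / 10 + 1) f

lemma ceilGo_succ (n target : Int) (k f : Nat) :
    ceilGo n target k (f + 1)
      = if digitSum (candB n k) ≤ target then candB n k - n else ceilGo n target (k + 1) f := rfl

lemma solveB_succ (target num : Int) (f : Nat) :
    solveB target num (f + 1)
      = if digitSum num ≤ target then num
        else solveB target (PySem.Int.floordiv num 10 + 1) f * 10 := rfl

lemma ceilF_succ (target m : Int) (f : Nat) :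
    ceilF target m (f + 1)
      = if digitSum m ≤ target then m else 10 * ceilF target ((m - 1) / 10 + 1) f := rfl

lemma fdiv_pos (a b : Int) (hb : 0 < b) : a.fdiv b = a / b := by
  rw [Int.fdiv_eq_ediv]; simp [hb.le]

lemma cand_ge (n M : Int) (hn : 1 ≤ n) (hM : 0 < M) :
    M ≤ ((n - 1) / M + 1) * M := by
  have : 0 ≤ (n - 1) / M := Int.ediv_nonneg (by omega) hM.le
  nlinarith

lemma cand_of_le (n M : Int) (hn : 1 ≤ n) (hM : 0 < M) (h : n ≤ M) :
    ((n - 1) / M + 1) * M = M := by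
  rw [Int.ediv_eq_zero_of_lt (by omega) (by omega)]; ring

lemma csplit (n M : Int) (hM : 0 < M) : (n - 1) / (10 * M) = ((n - 1) / M) / 10 := by
  rw [mul_comm, ← Int.ediv_ediv_of_nonneg hM.le]

-- if 10M divides the candidate at level M, the candidate at level 10M is the same value
lemma cand_align (n M : Int) (hn : 1 ≤ n) (hM : 0 < M)
    (hdvd : 10 * M ∣ ((n - 1) / M + 1) * M) :
    ((n - 1) / (10 * M) + 1) * (10 * M) = ((n - 1) / M + 1) * M := by
  have h10 : (10 : Int) ∣ ((n - 1) / M + 1) := by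
    rcases hdvd with ⟨c, hc⟩
    exact ⟨c, mul_right_cancel₀ hM.ne' (by linarith [hc])⟩
  rcases h10 with ⟨b, hb⟩
  have h1 : ((n - 1) / M) / 10 = b - 1 := by omega
  rw [csplit _ _ hM, h1, show (n - 1) / M = 10 * b - 1 by omega]; ring

-- if 10M does not divide the candidate c at level M, rounding c up to the next multiple of
-- 10M (strictly) gives exactly the candidate at level 10M
lemma cand_step (n M : Int) (hn : 1 ≤ n) (hM : 0 < M)
    (hdvd : ¬ 10 * M ∣ ((n - 1) / M + 1) * M) :
    ((((n - 1) / M + 1) * M) / (10 * M) + 1) * (10 * M)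
      = ((n - 1) / (10 * M) + 1) * (10 * M) := by
  have h10 : ¬ (10 : Int) ∣ ((n - 1) / M + 1) := by
    intro ⟨b, hb⟩
    exact hdvd ⟨b, by rw [hb]; ring⟩
  have hc : (((n - 1) / M + 1) * M) / (10 * M) = ((n - 1) / M + 1) / 10 := by
    rw [mul_comm 10 M, mul_comm _ M, Int.mul_ediv_mul_of_pos _ _ hM]
  rw [hc, csplit _ _ hM, show ((n - 1) / M + 1) / 10 = ((n - 1) / M) / 10 by omega]

-- ------- digit sums via Nat.toDigits -------

lemma toDigitsCore_acc (f : Nat) : ∀ (n : Nat) (acc : List Char),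
    Nat.toDigitsCore 10 f n acc = Nat.toDigitsCore 10 f n [] ++ acc := by
  induction f with
  | zero => intro n acc; simp [Nat.toDigitsCore]
  | succ f ih =>
    intro n acc
    simp only [Nat.toDigitsCore]
    by_cases h : n / 10 = 0
    · simp [h]
    · simp only [h, if_false]
      rw [ih (n/10) (Nat.digitChar (n % 10) :: acc), ih (n/10) [Nat.digitChar (n % 10)]]
      simp

lemma toDigitsCore_fuel (f : Nat) : ∀ (f' n : Nat), n < f → n < f' →
    Nat.toDigitsCore 10 f n [] = Nat.toDigitsCore 10 f' n [] := by
  induction f with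
  | zero => intro f' n h; omega
  | succ f ih =>
    intro f' n h h'
    cases f' with
    | zero => omega
    | succ f' =>
      simp only [Nat.toDigitsCore]
      by_cases h0 : n / 10 = 0
      · simp [h0]
      · simp only [h0, if_false]
        have hn10 : n / 10 < n := Nat.div_lt_self (by omega) (by omega)
        rw [toDigitsCore_acc, toDigitsCore_acc f', ih f' (n/10) (by omega) (by omega)]

lemma toDigits_unfold (n : Nat) (h : 10 ≤ n) :
    Nat.toDigits 10 n = Nat.toDigits 10 (n / 10) ++ [Nat.digitChar (n % 10)] := by
  have h0 : n / 10 ≠ 0 := by omega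
  show Nat.toDigitsCore 10 (n+1) n [] = _
  simp only [Nat.toDigitsCore, h0, if_false]
  rw [toDigitsCore_acc, toDigitsCore_fuel n (n/10 + 1) (n/10) (by omega) (by omega)]
  rfl

lemma digitChar_toNat (r : Nat) (h : r < 10) : (Nat.digitChar r).toNat = r + 48 := by
  interval_cases r <;> decide

lemma digitSum_ofNat (a : Nat) :
    digitSum (a : Int) = ((Nat.toDigits 10 a).map (fun c => (c.toNat : Int) - 48)).sum := by
  rw [digitSum, PySem.Int.toList_toStr, PySem.Int.toChars]
  rw [if_neg (by simp), Int.toNat_natCast]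

-- ds(m) = ds(m/10) + m%10 for m ≥ 1 — the master digit-sum lemma
lemma dsplit (m : Int) (h : 1 ≤ m) : digitSum m = digitSum (m / 10) + m % 10 := by
  obtain ⟨a, rfl⟩ : ∃ a : Nat, m = (a : Int) := ⟨m.toNat, (Int.toNat_of_nonneg (by omega)).symm⟩
  have ha : 1 ≤ a := by exact_mod_cast h
  have hdiv : ((a : Int) / 10) = ((a / 10 : Nat) : Int) := by omega
  have hmod : ((a : Int) % 10) = ((a % 10 : Nat) : Int) := by omega
  rw [hdiv, hmod, digitSum_ofNat, digitSum_ofNat]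
  by_cases h9 : a < 10
  · interval_cases a <;> decide
  · push_neg at h9
    rw [toDigits_unfold a h9, List.map_append, List.sum_append]
    have hr : ((Nat.digitChar (a % 10)).toNat : Int) - 48 = ((a % 10 : Nat) : Int) := by
      rw [digitChar_toNat (a % 10) (Nat.mod_lt _ (by norm_num))]; push_cast; ring
    simp [hr]

lemma digitSum_zero : digitSum 0 = 0 := by decide

lemma digitSum_one : digitSum 1 = 1 := by decide

lemma ds_mul10 (u : Int) (h : 1 ≤ u) : digitSum (10 * u) = digitSum u := by
  have h1 := dsplit (10 * u) (by omega)
  have h2 : 10 * u / 10 = u := by omega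
  have h3 : 10 * u % 10 = 0 := by omega
  rw [h2, h3] at h1; omega

lemma ds_pow_mul (k : Nat) (u : Int) (h : 1 ≤ u) : digitSum (10 ^ k * u) = digitSum u := by
  induction k with
  | zero => simp
  | succ k ih =>
    have hku : 1 ≤ 10 ^ k * u := by
      have : (1:Int) ≤ 10 ^ k := one_le_pow₀ (by norm_num)
      nlinarith
    rw [show (10:Int) ^ (k+1) * u = 10 * (10 ^ k * u) by ring, ds_mul10 _ hku, ih]

lemma ds_succ (t : Int) (h0 : 1 ≤ t) (h : t % 10 ≤ 8) : digitSum (t + 1) = digitSum t + 1 := by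
  have h1 := dsplit (t + 1) (by omega)
  have h2 := dsplit t h0
  have h3 : (t + 1) / 10 = t / 10 := by omega
  have h4 : (t + 1) % 10 = t % 10 + 1 := by omega
  rw [h3, h4] at h1; omega

-- ------- the carry helper on a candidate (A-side) -------

lemma fmod_zero_iff (a b : Int) : a.fmod b = 0 ↔ b ∣ a :=
  ⟨Int.dvd_of_fmod_eq_zero, Int.fmod_eq_zero_of_dvd⟩

lemma carryGo_climb (cur : Int) (k : Nat) (hk : (10 : Int) ^ k ∣ cur)
    (hnd : ¬ (10 : Int) ^ (k + 1) ∣ cur) :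
    ∀ (f j : Nat), j ≤ k → k + 1 - j ≤ f →
      carryGo cur ((10 : Int) ^ (j + 1)) f
        = (cur / (10 : Int) ^ (k + 1) + 1) * (10 : Int) ^ (k + 1) := by
  intro f
  induction f with
  | zero => intro j hj hf; omega
  | succ f ih =>
    intro j hj hf
    have hbpos : (0:Int) < 10 ^ (j+1) := by positivity
    simp only [carryGo, PySem.Int.divmod?, if_neg hbpos.ne']
    by_cases hcase : j = k
    · subst hcase
      rw [if_neg (fun h => hnd ((fmod_zero_iff _ _).mp h)), fdiv_pos _ _ hbpos]
    · have hdvd : (10:Int) ^ (j+1) ∣ cur :=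
        dvd_trans (pow_dvd_pow 10 (by omega)) hk
      rw [if_pos ((fmod_zero_iff _ _).mpr hdvd),
        show (10:Int)^(j+1) * 10 = 10 ^ (j+1+1) from by ring]
      exact ih (j+1) (by omega) (by omega)

lemma carryA_spec (cur : Int) (k : Nat) (hpos : (10 : Int) ^ k ≤ cur)
    (hk : (10 : Int) ^ k ∣ cur) (hnd : ¬ (10 : Int) ^ (k + 1) ∣ cur) :
    carryA cur = (cur / (10 : Int) ^ (k + 1) + 1) * (10 : Int) ^ (k + 1) := by
  have hkk : (k : ℕ) < 10 ^ k := Nat.lt_pow_self (by norm_num)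
  have hcurk : (k : Int) ≤ cur := le_trans (by exact_mod_cast hkk.le) hpos
  have hfuel : k + 1 - 0 ≤ cur.toNat + 1 := by omega
  have := carryGo_climb cur k hk hnd (cur.toNat + 1) 0 (by omega) hfuel
  rw [carryA, show (10:Int) = 10 ^ (0+1) from by norm_num]
  exact this

-- ------- the simulation of A's loop by the ceil-chain search -------

lemma loopA_succ (n target cur : Int) (f : Nat) :
    loopA n target cur (f + 1)
      = if digitSum cur ≤ target then cur - n else loopA n target (carryA cur) f := rfl

lemma digitSum_pow10 (k : Nat) : digitSum ((10 : Int) ^ k) = 1 := by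
  rw [show (10:Int) ^ k = 10 ^ k * 1 by ring, ds_pow_mul k 1 le_rfl, digitSum_one]

lemma candB_dvd (n : Int) (k : Nat) (hn : 1 ≤ n) : (10 : Int) ^ k ∣ candB n k :=
  ⟨(n - 1) / 10 ^ k + 1, mul_comm _ _⟩

lemma candB_ge (n : Int) (k : Nat) (hn : 1 ≤ n) : (10 : Int) ^ k ≤ candB n k :=
  cand_ge n _ hn (by positivity)

lemma candB_align (n : Int) (k : Nat) (hn : 1 ≤ n)
    (hdvd : (10 : Int) ^ (k + 1) ∣ candB n k) : candB n (k + 1) = candB n k := by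
  have hM : (0 : Int) < 10 ^ k := by positivity
  have hp : (10 : Int) ^ (k + 1) = 10 * 10 ^ k := by ring
  show ((n - 1) / 10 ^ (k+1) + 1) * 10 ^ (k+1) = candB n k
  rw [hp]
  exact cand_align n _ hn hM (by rw [← hp]; exact hdvd)

lemma candB_carry (n : Int) (k : Nat) (hn : 1 ≤ n)
    (hdvd : ¬ (10 : Int) ^ (k + 1) ∣ candB n k) : carryA (candB n k) = candB n (k + 1) := by
  have hM : (0 : Int) < 10 ^ k := by positivity
  have hp : (10 : Int) ^ (k + 1) = 10 * 10 ^ k := by ring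
  rw [carryA_spec (candB n k) k (candB_ge n k hn) (candB_dvd n k hn) hdvd]
  show (candB n k / 10 ^ (k+1) + 1) * 10 ^ (k+1) = ((n - 1) / 10 ^ (k+1) + 1) * 10 ^ (k+1)
  rw [hp]
  exact cand_step n _ hn hM (by rw [← hp]; exact hdvd)

lemma candB_of_le (n : Int) (k : Nat) (hn : 1 ≤ n) (h : n ≤ (10 : Int) ^ k) :
    candB n k = (10 : Int) ^ k :=
  cand_of_le n _ hn (by positivity) h

-- A's fueled loop agrees with the ceil-chain search; `cur` is either the current candidate or,
-- during the chain's null steps through levels dividing the candidate, the carry A has jumped to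
lemma sim (n target : Int) (hn : 1 ≤ n) (ht : 1 ≤ target) :
    ∀ (fb : Nat), ∀ (fa k : Nat) (cur : Int), fb + 1 ≤ fa →
      n ≤ (10 : Int) ^ (k + fb) →
      (cur = candB n k ∨
        (¬ digitSum (candB n k) ≤ target ∧ cur = carryA (candB n k))) →
      loopA n target cur fa = ceilGo n target k (fb + 1) := by
  intro fb
  induction fb with
  | zero =>
    intro fa k cur hfa hle hinv
    obtain ⟨fa', rfl⟩ : ∃ fa', fa = fa' + 1 := ⟨fa - 1, by omega⟩
    have hc : candB n k = 10 ^ k := candB_of_le n k hn (by simpa using hle)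
    have hP : digitSum (candB n k) ≤ target := by rw [hc, digitSum_pow10]; exact ht
    rcases hinv with rfl | ⟨hnP, _⟩
    · rw [loopA_succ, ceilGo_succ, if_pos hP, if_pos hP]
    · exact absurd hP hnP
  | succ fb ih =>
    intro fa k cur hfa hle hinv
    have hle' : n ≤ (10 : Int) ^ (k + 1 + fb) := by
      rw [show k + 1 + fb = k + (fb + 1) from by omega]; exact hle
    rcases hinv with rfl | ⟨hnP, rfl⟩
    · obtain ⟨fa', rfl⟩ : ∃ fa', fa = fa' + 1 := ⟨fa - 1, by omega⟩
      rw [loopA_succ, ceilGo_succ]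
      by_cases hP : digitSum (candB n k) ≤ target
      · rw [if_pos hP, if_pos hP]
      · rw [if_neg hP, if_neg hP]
        refine ih fa' (k + 1) (carryA (candB n k)) (by omega) hle' ?_
        by_cases hdvd : (10 : Int) ^ (k + 1) ∣ candB n k
        · exact Or.inr ⟨by rw [candB_align n k hn hdvd]; exact hP,
            by rw [candB_align n k hn hdvd]⟩
        · exact Or.inl (candB_carry n k hn hdvd)
    · rw [ceilGo_succ, if_neg hnP]
      refine ih fa (k + 1) (carryA (candB n k)) (by omega) hle' ?_
      by_cases hdvd : (10 : Int) ^ (k + 1) ∣ candB n k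
      · exact Or.inr ⟨by rw [candB_align n k hn hdvd]; exact hnP,
          by rw [candB_align n k hn hdvd]⟩
      · exact Or.inl (candB_carry n k hn hdvd)

-- ------- ceil chain as a prefix recursion -------

lemma ceilGo_eq_ceilF (n target : Int) (hn : 1 ≤ n) (ht : 1 ≤ target) :
    ∀ (f : Nat) (k : Nat), (n - 1) / 10 ^ k + 1 ≤ (f : Int) →
      ceilGo n target k f = 10 ^ k * ceilF target ((n - 1) / 10 ^ k + 1) f - n := by
  intro f
  induction f with
  | zero =>
    intro k hf
    have : (0:Int) ≤ (n - 1) / 10 ^ k := Int.ediv_nonneg (by omega) (by positivity)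
    exact absurd hf (by push_cast; omega)
  | succ f ih =>
    intro k hf
    set u : Int := (n - 1) / 10 ^ k + 1 with hu
    have hu1 : 1 ≤ u := by
      have : (0:Int) ≤ (n - 1) / 10 ^ k := Int.ediv_nonneg (by omega) (by positivity)
      omega
    have hcand : candB n k = 10 ^ k * u := by rw [candB]; ring
    have hds : digitSum (candB n k) = digitSum u := by rw [hcand, ds_pow_mul k u hu1]
    rw [ceilGo_succ, ceilF_succ, hds]
    by_cases hP : digitSum u ≤ target
    · rw [if_pos hP, if_pos hP, hcand]
    · rw [if_neg hP, if_neg hP]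
      have hu2 : 2 ≤ u := by
        rcases eq_or_lt_of_le hu1 with h1 | h1
        · exact absurd (by rw [← h1, digitSum_one]; exact ht) hP
        · omega
      have harg : (n - 1) / 10 ^ (k + 1) + 1 = (u - 1) / 10 + 1 := by
        have : (n - 1) / 10 ^ (k + 1) = ((n - 1) / 10 ^ k) / 10 := by
          rw [show (10:Int) ^ (k+1) = 10 * 10 ^ k by ring, csplit _ _ (by positivity)]
        omega
      have hfuel : (n - 1) / 10 ^ (k + 1) + 1 ≤ (f : Int) := by
        rw [harg]
        have : (u - 1) / 10 ≤ u - 2 := by omega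
        push_cast at hf ⊢; omega
      rw [ih (k + 1) hfuel, harg]
      ring
  
-- ------- fuel independence and the shift lemma for B's recursion -------

lemma floordiv_cast_ten (m : Nat) : PySem.Int.floordiv (m : Int) 10 = ((m / 10 : Nat) : Int) := by
  have : PySem.Int.floordiv (m : Int) 10 = (m : Int).fdiv 10 := rfl
  rw [this, fdiv_pos _ _ (by norm_num)]
  omega

lemma solveB_fuel (target : Int) (ht : 1 ≤ target) :
    ∀ (m : Nat), 1 ≤ m → ∀ f, m ≤ f → solveB target (m : Int) f = solveB target (m : Int) m := by
  intro m
  induction m using Nat.strong_induction_on with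
  | _ m ih =>
    intro hm f hf
    obtain ⟨f', rfl⟩ : ∃ f', f = f' + 1 := ⟨f - 1, by omega⟩
    obtain ⟨m', rfl⟩ : ∃ m', m = m' + 1 := ⟨m - 1, by omega⟩
    rw [solveB_succ, solveB_succ]
    by_cases hds : digitSum ((m' + 1 : Nat) : Int) ≤ target
    · rw [if_pos hds, if_pos hds]
    · rw [if_neg hds, if_neg hds]
      have hm2 : 2 ≤ m' + 1 := by
        by_contra h
        have h0 : m' = 0 := by omega
        subst h0
        rw [show ((0 + 1 : Nat) : Int) = 1 by norm_num, digitSum_one] at hds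
        omega
      rw [floordiv_cast_ten, show ((m' + 1) / 10 : Nat) + (1:Int) = (((m' + 1) / 10 + 1 : Nat) : Int) by push_cast; ring]
      set w : Nat := (m' + 1) / 10 + 1 with hw
      have hwlt : w ≤ m' := by omega
      rw [ih w (by omega) (by omega) f' (by omega), ih w (by omega) (by omega) m' (by omega)]

-- agreement of B's recursion across the +1 bump of the prefix, whenever the digit sum still fails
lemma solveB_shift (target : Int) (ht : 1 ≤ target) :
    ∀ (t : Nat), 1 ≤ t → target < digitSum (t : Int) →
      solveB target (t : Int) t = solveB target ((t + 1 : Nat) : Int) (t + 1) := by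
  intro t
  induction t using Nat.strong_induction_on with
  | _ t ih =>
    intro ht1 hds
    have ht2 : 2 ≤ t := by
      by_contra h
      have h0 : t = 1 := by omega
      subst h0
      rw [show ((1 : Nat) : Int) = 1 by norm_num, digitSum_one] at hds
      omega
    obtain ⟨t', rfl⟩ : ∃ t', t = t' + 1 := ⟨t - 1, by omega⟩
    rw [solveB_succ, solveB_succ, if_neg (by omega)]
    by_cases h9 : (t' + 1) % 10 = 9
    · -- carry case: t + 1 = 10 * u with u = t/10 + 1
      obtain ⟨u, hu⟩ : ∃ u : Nat, u = (t' + 1) / 10 + 1 := ⟨_, rfl⟩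
      have h10u : (t' + 1 + 1 : Nat) = 10 * u := by omega
      have hu1 : 1 ≤ u := by omega
      have hds10 : digitSum ((t' + 1 + 1 : Nat) : Int) = digitSum (u : Int) := by
        rw [h10u, show ((10 * u : Nat) : Int) = 10 * (u : Int) by push_cast; ring,
          ds_mul10 _ (by exact_mod_cast hu1)]
      by_cases hP : digitSum ((u : Nat) : Int) ≤ target
      · rw [if_pos (by rw [hds10]; exact hP)]
        rw [floordiv_cast_ten, show (((t' + 1) / 10 : Nat) : Int) + 1 = ((u : Nat) : Int) by push_cast; omega]
        rw [solveB_fuel target ht u hu1 t' (by omega)]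
        obtain ⟨u', rfl⟩ : ∃ u', u = u' + 1 := ⟨u - 1, by omega⟩
        rw [solveB_succ, if_pos hP]
        push_cast
        omega
      · rw [if_neg (by rw [hds10]; exact hP)]
        rw [floordiv_cast_ten, floordiv_cast_ten,
          show (((t' + 1) / 10 : Nat) : Int) + 1 = ((u : Nat) : Int) by push_cast; omega,
          show (((t' + 1 + 1) / 10 : Nat) : Int) + 1 = (((u + 1) : Nat) : Int) by push_cast; omega]
        have hult : u < t' + 1 := by omega
        rw [solveB_fuel target ht u hu1 t' (by omega),
          solveB_fuel target ht (u + 1) (by omega) (t' + 1) (by omega),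
          ih u hult hu1 (by push_cast at hP ⊢; omega)]
    · -- no carry: digit sum grows by 1, both recurse on the same prefix
      have hds1 : digitSum ((t' + 1 + 1 : Nat) : Int) = digitSum ((t' + 1 : Nat) : Int) + 1 := by
        rw [show ((t' + 1 + 1 : Nat) : Int) = ((t' + 1 : Nat) : Int) + 1 by push_cast; ring,
          ds_succ _ (by exact_mod_cast ht1) (by omega)]
      rw [if_neg (by omega)]
      obtain ⟨w, hw⟩ : ∃ w : Nat, w = (t' + 1) / 10 + 1 := ⟨_, rfl⟩
      rw [floordiv_cast_ten, floordiv_cast_ten,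
        show (((t' + 1) / 10 : Nat) : Int) + 1 = ((w : Nat) : Int) by push_cast; omega,
        show (((t' + 1 + 1) / 10 : Nat) : Int) + 1 = ((w : Nat) : Int) by push_cast; omega]
      rw [solveB_fuel target ht w (by omega) t' (by omega),
        solveB_fuel target ht w (by omega) (t' + 1) (by omega)]

-- the prefix recursion equals B's recursion
lemma ceilF_eq_solveB (target : Int) (ht : 1 ≤ target) :
    ∀ (m : Nat), 1 ≤ m → ∀ f1 f2, m ≤ f1 → m ≤ f2 →
      ceilF target (m : Int) f1 = solveB target (m : Int) f2 := by
  intro m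
  induction m using Nat.strong_induction_on with
  | _ m ih =>
    intro hm f1 f2 hf1 hf2
    obtain ⟨f1', rfl⟩ : ∃ g, f1 = g + 1 := ⟨f1 - 1, by omega⟩
    obtain ⟨f2', rfl⟩ : ∃ g, f2 = g + 1 := ⟨f2 - 1, by omega⟩
    rw [ceilF_succ, solveB_succ]
    by_cases hds : digitSum ((m : Nat) : Int) ≤ target
    · rw [if_pos hds, if_pos hds]
    · rw [if_neg hds, if_neg hds]
      have hm2 : 2 ≤ m := by
        by_contra h
        have h0 : m = 1 := by omega
        subst h0
        rw [show ((1 : Nat) : Int) = 1 by norm_num, digitSum_one] at hds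
        omega
      rw [floordiv_cast_ten]
      by_cases h0 : m % 10 = 0
      · -- 10 ∣ m: ceilF recurses on t = m/10, solveB on t + 1; the shift lemma bridges
        obtain ⟨t, hT⟩ : ∃ t : Nat, t = m / 10 := ⟨_, rfl⟩
        have ht1 : 1 ≤ t := by omega
        have hdst : target < digitSum ((t : Nat) : Int) := by
          have hmt : ((m : Nat) : Int) = 10 * (t : Int) := by push_cast; omega
          rw [hmt, ds_mul10 _ (by exact_mod_cast ht1)] at hds
          omega
        rw [show ((m : Int) - 1) / 10 + 1 = ((t : Nat) : Int) by omega,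
          show (((m / 10) : Nat) : Int) + 1 = (((t + 1) : Nat) : Int) by push_cast; omega]
        rw [ih t (by omega) ht1 f1' t (by omega) le_rfl,
          solveB_shift target ht t ht1 hdst,
          solveB_fuel target ht (t + 1) (by omega) f2' (by omega)]
        ring
      · -- 10 ∤ m: both recurse on the same prefix m/10 + 1
        obtain ⟨w, hw⟩ : ∃ w : Nat, w = m / 10 + 1 := ⟨_, rfl⟩
        rw [show ((m : Int) - 1) / 10 + 1 = ((w : Nat) : Int) by omega,
          show (((m / 10) : Nat) : Int) + 1 = ((w : Nat) : Int) by push_cast; omega]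
        rw [ih w (by omega) (by omega) f1' f2' (by omega) (by omega)]
        ring

-- ===== VERDICT (by name: the statement is the Claim_ definition above) =====
theorem makeIntegerBeautiful_spec : Claim_equal_makeIntegerBeautiful := by
  intro n target _ hpre
  obtain ⟨hn0, hcase⟩ := hpre
  unfold Spec_makeIntegerBeautiful makeIntegerBeautiful makeIntegerBeautiful_alt
  by_cases hz : n = 0
  · subst hz
    have ht0 : 0 ≤ target := by
      rcases hcase with h | h
      · omega
      · exact h.2
    have h0 : digitSum 0 ≤ target := by rw [digitSum_zero]; exact ht0
    show loopA 0 target 0 ((0:Int).toNat + 2) = solveB target 0 ((0:Int).toNat + 2) - 0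
    rw [show ((0:Int).toNat + 2) = 1 + 1 from rfl, loopA_succ, solveB_succ, if_pos h0, if_pos h0]
  · have hn : 1 ≤ n := by omega
    have ht : 1 ≤ target := by
      rcases hcase with h | h
      · exact h
      · exact absurd h.1 hz
    have hA : loopA n target n (n.toNat + 2) = ceilGo n target 0 (n.toNat + 2) := by
      rw [show n.toNat + 2 = (n.toNat + 1) + 1 from rfl]
      apply sim n target hn ht (n.toNat + 1) (n.toNat + 1 + 1) 0 n (by omega)
      · have h1 : n.toNat < 10 ^ n.toNat := Nat.lt_pow_self (by norm_num)
        have h2 : (n : Int) = (n.toNat : Int) := (Int.toNat_of_nonneg (by omega)).symm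
        calc n = (n.toNat : Int) := h2
          _ ≤ (10 : Int) ^ n.toNat := by exact_mod_cast h1.le
          _ ≤ (10 : Int) ^ (0 + (n.toNat + 1)) := by
              rw [zero_add]
              exact pow_le_pow_right₀ (by norm_num) (by omega)
      · exact Or.inl (by show n = ((n-1)/10^0 + 1) * 10^0; simp)
    have hcast : ((n.toNat : Nat) : Int) = n := Int.toNat_of_nonneg (by omega)
    have hFS : ceilF target n (n.toNat + 2) = solveB target n (n.toNat + 2) := by
      have h := ceilF_eq_solveB target ht n.toNat (by omega) (n.toNat + 2) (n.toNat + 2)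
        (by omega) (by omega)
      rwa [hcast] at h
    have hB : ceilGo n target 0 (n.toNat + 2) = solveB target n (n.toNat + 2) - n := by
      rw [ceilGo_eq_ceilF n target hn ht (n.toNat + 2) 0 (by push_cast; omega),
        show (n - 1) / 10 ^ 0 + 1 = n by simp, pow_zero, one_mul, hFS]
    rw [hA, hB]
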